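-- pv_equiv track=rewrite | github.com/Mr-DrSwan/fortigate-config-analyzer | config_sections.py | replace_or_append_config_section
-- ===== SOURCE A (Python) =====
-- def replace_or_append_config_section(config_text: str, section_name: str, section_body: str) -> str:
--     target = f"config {section_name}".lower()
--     lines = config_text.splitlines()
--     start_idx = -1
--     end_idx = -1
--     depth = 0
--     in_target = False
--
--     for idx, raw in enumerate(lines):
--         line = raw.strip().lower()
--         if not in_target:
--             if line == target:
--                 in_target = True
--                 start_idx = idx
--                 depth = 1
--             continue
--         if line.startswith("config "):
--             depth += 1
--             continue
--         if line == "end":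
--             depth -= 1
--             if depth == 0:
--                 end_idx = idx
--                 break
--
--     section_lines = section_body.splitlines()
--     if start_idx >= 0 and end_idx >= start_idx:
--         rebuilt = lines[:start_idx] + section_lines + lines[end_idx + 1 :]
--     else:
--         rebuilt = lines[:]
--         if rebuilt and rebuilt[-1].strip():
--             rebuilt.append("")
--         rebuilt.extend(section_lines)
--     return "\n".join(rebuilt).rstrip() + "\n"
-- ===== SOURCE B (Python) =====
-- def replace_or_append_config_section(config_text: str, section_name: str, section_body: str) -> str:
--     target = ("config " + section_name).lower()
--     lines = config_text.splitlines()
--     # Single pass with an explicit stack: pair EVERY 'config ...' opener with its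
--     # matching 'end' (classic bracket matching), recording pairs in a dict, and
--     # note the first line equal to the target on the way.
--     stack = []
--     match = {}
--     start = -1
--     for idx, raw in enumerate(lines):
--         line = raw.strip().lower()
--         if start < 0 and line == target:
--             start = idx
--         if line.startswith("config "):
--             stack.append(idx)
--         elif line == "end" and stack:
--             match[stack.pop()] = idx
--     sec = section_body.splitlines()
--     if start >= 0 and start in match:
--         out = lines[:start] + sec + lines[match[start] + 1:]
--     else:
--         out = list(lines)
--         if out and out[-1].strip():
--             out.append("")
--         out += sec
--     return "\n".join(out).rstrip() + "\n"
-- ===== Notes on version B (the rewrite author's own statement) =====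
-- stated objective: alternative
-- what changed: Instead of A's target-relative state machine (find the target header, then count depth until the matching end, with in_target/depth/break), B does one target-independent bracket-matching pass with an explicit stack that pairs EVERY 'config' opener with its matching 'end' in a dict, noting the first target line on the way; the splice then is a dict lookup.
import Mathlib
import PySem

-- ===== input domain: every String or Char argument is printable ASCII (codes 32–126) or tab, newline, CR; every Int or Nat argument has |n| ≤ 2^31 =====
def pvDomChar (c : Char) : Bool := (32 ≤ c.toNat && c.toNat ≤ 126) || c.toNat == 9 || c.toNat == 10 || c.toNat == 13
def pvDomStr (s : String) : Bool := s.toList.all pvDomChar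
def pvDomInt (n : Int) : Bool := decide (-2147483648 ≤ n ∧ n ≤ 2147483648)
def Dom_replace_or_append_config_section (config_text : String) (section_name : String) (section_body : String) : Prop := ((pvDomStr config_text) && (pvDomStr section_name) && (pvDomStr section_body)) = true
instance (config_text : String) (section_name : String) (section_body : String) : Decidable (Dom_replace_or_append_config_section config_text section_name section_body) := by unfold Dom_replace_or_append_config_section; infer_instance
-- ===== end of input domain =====

-- B replaces A's target-relative state machine (in_target/depth/break) by one target-independent
-- bracket-matching pass with an explicit stack pairing every 'config' opener with its 'end' in a
-- dict; same return value everywhere (objective: alternative algorithm, same cost).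

-- raw.strip().lower(), used by both Pythons
def pvNorm (raw : String) : String := PySem.Str.lower (PySem.Str.strip raw)

-- ===== PORT A =====
-- A's single for-loop with state (start_idx, end_idx, depth, in_target) and break
def pvLoopA (target : String) : List String → Nat → Int → Int → Int → Bool → Int × Int
  | [], _, st, en, _, _ => (st, en)
  | raw :: rest, idx, st, en, depth, inT =>
    let line := pvNorm raw
    if !inT then
      if line == target then pvLoopA target rest (idx+1) (idx : Int) en 1 true
      else pvLoopA target rest (idx+1) st en depth false
    else if PySem.Str.startswith line "config " then pvLoopA target rest (idx+1) st en (depth+1) true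
    else if line == "end" then
      (if depth - 1 == 0 then (st, (idx : Int)) else pvLoopA target rest (idx+1) st en (depth-1) true)
    else pvLoopA target rest (idx+1) st en depth true

def replace_or_append_config_section (config_text : String) (section_name : String) (section_body : String) : String :=
  let target := PySem.Str.lower ("config " ++ section_name)
  let lines := PySem.Str.splitlines config_text
  let p := pvLoopA target lines 0 (-1) (-1) 0 false
  let start_idx := p.1
  let end_idx := p.2
  let section_lines := PySem.Str.splitlines section_body
  let rebuilt :=
    if start_idx ≥ 0 ∧ end_idx ≥ start_idx then
      PySem.List.slice lines none (some start_idx) ++ section_lines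
        ++ PySem.List.slice lines (some (end_idx + 1)) none
    else
      let r :=
        match PySem.List.pyGet? lines (-1) with
        | some last => if PySem.Str.strip last == "" then lines else lines ++ [""]
        | none => lines
      r ++ section_lines
  PySem.Str.rstrip (PySem.Str.join "\n" rebuilt) ++ "\n"

-- ===== PORT B =====
-- B's single bracket-matching pass: stack of open 'config' line indices, dict of opener ↦ matching
-- 'end' index, plus the first index whose normalized line equals the target (-1 sentinel as in Source B)
def pvLoopB (target : String) : List String → Nat → Int → List Int → PySem.Dict Int Int → Int × PySem.Dict Int Int
  | [], _, start, _, m => (start, m)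
  | raw :: rest, idx, start, stack, m =>
    let line := pvNorm raw
    let start' := if start < 0 ∧ line == target then (idx : Int) else start
    if PySem.Str.startswith line "config " then
      pvLoopB target rest (idx+1) start' ((idx : Int) :: stack) m
    else if line == "end" then
      match stack with
      | top :: st => pvLoopB target rest (idx+1) start' st (m.insert top (idx : Int))
      | [] => pvLoopB target rest (idx+1) start' [] m
    else pvLoopB target rest (idx+1) start' stack m

def replace_or_append_config_section_alt (config_text : String) (section_name : String) (section_body : String) : String :=
  let target := PySem.Str.lower ("config " ++ section_name)
  let lines := PySem.Str.splitlines config_text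
  let p := pvLoopB target lines 0 (-1) [] PySem.Dict.empty
  let start := p.1
  -- 'start >= 0 and start in match' with the looked-up value
  let hit := if 0 ≤ start then p.2.get? start else none
  let sec := PySem.Str.splitlines section_body
  let out :=
    match hit with
    | some e => lines.take start.toNat ++ sec ++ lines.drop (e.toNat + 1)
    | none =>
      let pad :=
        match lines.getLast? with
        | some l => if PySem.Str.strip l == "" then ([] : List String) else [""]
        | none => []
      lines ++ pad ++ sec
  PySem.Str.rstrip (PySem.Str.join "\n" out) ++ "\n"

-- ===== PRECONDITION & SPEC =====
def Spec_replace_or_append_config_section (config_text : String) (section_name : String) (section_body : String) (out : String) : Prop := out = replace_or_append_config_section_alt config_text section_name section_body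
instance (config_text : String) (section_name : String) (section_body : String) (out : String) : Decidable (Spec_replace_or_append_config_section config_text section_name section_body out) := by unfold Spec_replace_or_append_config_section; infer_instance

-- ===== CLAIM (what is proved, stated in full; the proofs are below) =====
def Claim_equal_replace_or_append_config_section : Prop := ∀ (config_text : String) (section_name : String) (section_body : String), Dom_replace_or_append_config_section config_text section_name section_body → Spec_replace_or_append_config_section config_text section_name section_body (replace_or_append_config_section config_text section_name section_body)

-- ===== LEMMAS AND PROOFS =====

-- proof-side yardstick: the first index ≥ j (Python enumerate offset) where a depth counter
-- started at `depth` hits 0; both loops are characterized against it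
def pvFindEnd : List String → Nat → Int → Option Nat
  | [], _, _ => none
  | line :: rest, j, depth =>
    if PySem.Str.startswith line "config " then pvFindEnd rest (j+1) (depth+1)
    else if line == "end" then
      (if depth - 1 == 0 then some j else pvFindEnd rest (j+1) (depth-1))
    else pvFindEnd rest (j+1) depth

-- the target line itself starts with "config "
theorem pvTarget_startswith (name : String) :
    PySem.Str.startswith (PySem.Str.lower ("config " ++ name)) "config " = true := by
  rw [PySem.Str.startswith_eq, PySem.Chars.startswith_iff]
  simp only [PySem.Str.toList_lower, String.toList_append, PySem.Chars.lower, List.map_append]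
  exact List.IsPrefix.trans (by decide) (List.prefix_append _ _)

-- ---- A-side characterization ----
theorem pvLoopA_true (target : String) (lines : List String) :
    ∀ (idx : Nat) (st en depth : Int),
    pvLoopA target lines idx st en depth true =
      (st, match pvFindEnd (lines.map pvNorm) idx depth with
           | some j => (j : Int)
           | none => en) := by
  induction lines with
  | nil => intro idx st en depth; simp [pvLoopA, pvFindEnd]
  | cons raw rest ih =>
    intro idx st en depth
    simp only [pvLoopA, pvFindEnd, List.map_cons]
    rw [show (!true) = false from rfl]
    simp only [Bool.false_eq_true, if_false]
    split_ifs with h1 h2 h3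
    · exact ih _ _ _ _
    · rfl
    · exact ih _ _ _ _
    · exact ih _ _ _ _

theorem pvLoopA_false (target : String) (lines : List String) :
    ∀ (idx : Nat),
    pvLoopA target lines idx (-1) (-1) 0 false =
      match PySem.List.index? (lines.map pvNorm) target with
      | none => (-1, -1)
      | some s =>
          (((idx + s : Nat) : Int),
           match pvFindEnd ((lines.map pvNorm).drop (s+1)) (idx + s + 1) 1 with
           | some j => (j : Int)
           | none => -1) := by
  induction lines with
  | nil => intro idx; simp [pvLoopA, PySem.List.index?]
  | cons raw rest ih =>
    intro idx
    simp only [pvLoopA, List.map_cons, Bool.not_false]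
    by_cases h : pvNorm raw == target
    · rw [if_pos h]
      have ht : pvNorm raw = target := by exact eq_of_beq h
      rw [ht, PySem.List.index?_cons_self]
      simp only [List.drop_succ_cons, List.drop_zero, Nat.add_zero]
      exact pvLoopA_true target rest (idx+1) idx (-1) 1
    · rw [if_neg h]
      have ht : pvNorm raw ≠ target := fun he => h (by simp [he])
      rw [ih (idx+1)]
      rw [show PySem.List.index? (pvNorm raw :: rest.map pvNorm) target
            = (PySem.List.index? (rest.map pvNorm) target).map (· + 1) from
          PySem.List.index?_cons_of_ne _ ht]
      cases hi : PySem.List.index? (rest.map pvNorm) target with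
      | none => simp
      | some s =>
        simp only [Option.map_some, List.drop_succ_cons]
        simp
        refine ⟨by omega, ?_⟩
        have h3 : idx + 1 + s + 1 = idx + (s + 1) + 1 := by omega
        rw [h3]

theorem pvFindEnd_ge (ns : List String) :
    ∀ (j e : Nat) (d : Int), pvFindEnd ns j d = some e → j ≤ e := by
  induction ns with
  | nil => intro j e d h; simp [pvFindEnd] at h
  | cons line rest ih =>
    intro j e d h
    simp only [pvFindEnd] at h
    split_ifs at h with h1 h2 h3
    · exact Nat.le_of_succ_le (ih _ _ _ h)
    · simp at h; omega
    · exact Nat.le_of_succ_le (ih _ _ _ h)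
    · exact Nat.le_of_succ_le (ih _ _ _ h)

-- ---- B-side characterization ----

-- start is fixed once set
theorem pvLoopB_start_fixed (target : String) (lines : List String) :
    ∀ (idx : Nat) (s : Int) (st : List Int) (m : PySem.Dict Int Int), 0 ≤ s →
    (pvLoopB target lines idx s st m).1 = s := by
  induction lines with
  | nil => intro idx s st m hs; simp [pvLoopB]
  | cons raw rest ih =>
    intro idx s st m hs
    have hc : ¬ (s < 0 ∧ (pvNorm raw == target) = true) := by rintro ⟨h1, _⟩; omega
    simp only [pvLoopB, if_neg hc]
    split_ifs with h1 h2
    · exact ih _ _ _ _ hs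
    · cases st with
      | nil => exact ih _ _ _ _ hs
      | cons top st' => exact ih _ _ _ _ hs
    · exact ih _ _ _ _ hs

-- start is the first index whose normalized line equals target (-1 if none)
theorem pvLoopB_start (target : String) (lines : List String) :
    ∀ (idx : Nat) (st : List Int) (m : PySem.Dict Int Int),
    (pvLoopB target lines idx (-1) st m).1 =
      match PySem.List.index? (lines.map pvNorm) target with
      | none => -1
      | some k => ((idx + k : Nat) : Int) := by
  induction lines with
  | nil => intro idx st m; simp [pvLoopB, PySem.List.index?]
  | cons raw rest ih =>
    intro idx st m
    simp only [pvLoopB, List.map_cons]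
    by_cases h : pvNorm raw == target
    · have ht : pvNorm raw = target := eq_of_beq h
      have hc : ((-1 : Int) < 0 ∧ (pvNorm raw == target) = true) := ⟨by norm_num, h⟩
      rw [if_pos hc, ht, PySem.List.index?_cons_self]
      split_ifs with h1 h2
      · rw [pvLoopB_start_fixed target rest _ _ _ _ (by positivity)]; simp
      · cases st with
        | nil => rw [pvLoopB_start_fixed target rest _ _ _ _ (by positivity)]; simp
        | cons top st' => rw [pvLoopB_start_fixed target rest _ _ _ _ (by positivity)]; simp
      · rw [pvLoopB_start_fixed target rest _ _ _ _ (by positivity)]; simp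
    · have hc : ¬ ((-1 : Int) < 0 ∧ (pvNorm raw == target) = true) := by rintro ⟨_, hh⟩; exact h hh
      have ht : pvNorm raw ≠ target := fun he => h (by simp [he])
      rw [if_neg hc, PySem.List.index?_cons_of_ne _ ht]
      have harith : ∀ k : Nat, ((idx + 1 + k : Nat) : Int) = ((idx + (k + 1) : Nat) : Int) := by
        intro k; push_cast; ring
      split_ifs with h1 h2
      · rw [ih]
        cases hi : PySem.List.index? (rest.map pvNorm) target with
        | none => simp
        | some k => simp only [Option.map_some]; rw [harith k]
      · cases st with
        | nil =>
          rw [ih]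
          cases hi : PySem.List.index? (rest.map pvNorm) target with
          | none => simp
          | some k => simp only [Option.map_some]; rw [harith k]
        | cons top st' =>
          rw [ih]
          cases hi : PySem.List.index? (rest.map pvNorm) target with
          | none => simp
          | some k => simp only [Option.map_some]; rw [harith k]
      · rw [ih]
        cases hi : PySem.List.index? (rest.map pvNorm) target with
        | none => simp
        | some k => simp only [Option.map_some]; rw [harith k]

-- a key smaller than every future index and absent from the stack is never written again
theorem pvLoopB_no_write (target : String) (lines : List String) :
    ∀ (idx : Nat) (s0 k : Int) (st : List Int) (m : PySem.Dict Int Int),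
    k ∉ st → k < (idx : Int) →
    ((pvLoopB target lines idx s0 st m).2).get? k = m.get? k := by
  induction lines with
  | nil => intro idx s0 k st m hst hk; simp [pvLoopB]
  | cons raw rest ih =>
    intro idx s0 k st m hst hk
    by_cases hc : (s0 < 0 ∧ (pvNorm raw == target) = true)
    · simp only [pvLoopB, if_pos hc]
      split_ifs with h1 h2
      · exact ih (idx+1) _ k ((idx : Int) :: st) m
          (by intro hmem; rcases List.mem_cons.mp hmem with h | h
              · omega
              · exact hst h) (by push_cast; omega)
      · cases st with
        | nil => exact ih (idx+1) _ k [] m (by simp) (by push_cast; omega)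
        | cons top st' =>
          have htop : k ≠ top := fun he => hst (he ▸ List.mem_cons_self)
          exact (ih (idx+1) _ k st' (m.insert top (idx : Int))
              (fun hmem => hst (List.mem_cons_of_mem _ hmem)) (by push_cast; omega)).trans
            (PySem.Dict.get?_insert_of_ne _ _ htop)
      · exact ih (idx+1) _ k st m hst (by push_cast; omega)
    · simp only [pvLoopB, if_neg hc]
      split_ifs with h1 h2
      · exact ih (idx+1) _ k ((idx : Int) :: st) m
          (by intro hmem; rcases List.mem_cons.mp hmem with h | h
              · omega
              · exact hst h) (by push_cast; omega)
      · cases st with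
        | nil => exact ih (idx+1) _ k [] m (by simp) (by push_cast; omega)
        | cons top st' =>
          have htop : k ≠ top := fun he => hst (he ▸ List.mem_cons_self)
          exact (ih (idx+1) _ k st' (m.insert top (idx : Int))
              (fun hmem => hst (List.mem_cons_of_mem _ hmem)) (by push_cast; omega)).trans
            (PySem.Dict.get?_insert_of_ne _ _ htop)
      · exact ih (idx+1) _ k st m hst (by push_cast; omega)

-- stack pairing computes exactly A's depth scan: with s below `extra` on the stack, the dict
-- entry at s ends up at the index where a depth counter started at extra.length+1 hits 0
theorem pvLoopB_pop (target : String) (lines : List String) :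
    ∀ (idx : Nat) (s0 : Int) (extra st : List Int) (m : PySem.Dict Int Int) (s : Nat) (d : Int),
    ((s : Int) ∉ st) → s < idx → (∀ x ∈ extra, (s : Int) < x) → d = (extra.length : Int) + 1 →
    ((pvLoopB target lines idx s0 (extra ++ (s : Int) :: st) m).2).get? s =
      match pvFindEnd (lines.map pvNorm) idx d with
      | some e => some ((e : Nat) : Int)
      | none => m.get? s := by
  induction lines with
  | nil => intro idx s0 extra st m s d hst hs hextra hd; simp [pvLoopB, pvFindEnd]
  | cons raw rest ih =>
    intro idx s0 extra st m s d hst hs hextra hd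
    by_cases hc : (s0 < 0 ∧ (pvNorm raw == target) = true)
    · simp only [pvLoopB, pvFindEnd, List.map_cons, if_pos hc]
      split_ifs with h1 h2 h3
      · -- 'config' opener: push idx, depth grows
        exact ih (idx+1) _ ((idx : Int) :: extra) st m s (d + 1) hst (by omega)
          (by intro x hx
              rcases List.mem_cons.mp hx with h | h
              · exact h ▸ (by exact_mod_cast hs)
              · exact hextra x h)
          (by simp only [List.length_cons]; push_cast; omega)
      · -- 'end' with the counter hitting 0: extra is empty, s itself is popped
        rw [beq_iff_eq] at h3
        have hex : extra = [] := by
          cases extra with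
          | nil => rfl
          | cons x extra' => exfalso; simp only [List.length_cons] at hd; push_cast at hd; omega
        subst hex
        exact (pvLoopB_no_write target rest (idx+1) _ (s : Int) st (m.insert (s : Int) (idx : Int))
            hst (by push_cast; omega)).trans (by rw [PySem.Dict.get?_insert_self])
      · -- 'end' with the counter still positive: extra nonempty, its head is popped
        rw [beq_iff_eq] at h3
        cases extra with
        | nil => exfalso; simp only [List.length_nil] at hd; push_cast at hd; omega
        | cons x extra' =>
          have hxs : (s : Int) ≠ x := by have := hextra x List.mem_cons_self; omega
          refine (ih (idx+1) _ extra' st (m.insert x (idx : Int)) s (d - 1) hst (by omega)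
              (fun y hy => hextra y (List.mem_cons_of_mem _ hy))
              (by simp only [List.length_cons] at hd; push_cast at hd ⊢; omega)).trans ?_
          cases he : pvFindEnd (rest.map pvNorm) (idx + 1) (d - 1) with
          | some e => rfl
          | none => exact PySem.Dict.get?_insert_of_ne _ _ hxs
      · -- other line: nothing changes
        exact ih (idx+1) _ extra st m s d hst (by omega) hextra hd
    · simp only [pvLoopB, pvFindEnd, List.map_cons, if_neg hc]
      split_ifs with h1 h2 h3
      · -- 'config' opener: push idx, depth grows
        exact ih (idx+1) _ ((idx : Int) :: extra) st m s (d + 1) hst (by omega)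
          (by intro x hx
              rcases List.mem_cons.mp hx with h | h
              · exact h ▸ (by exact_mod_cast hs)
              · exact hextra x h)
          (by simp only [List.length_cons]; push_cast; omega)
      · -- 'end' with the counter hitting 0: extra is empty, s itself is popped
        rw [beq_iff_eq] at h3
        have hex : extra = [] := by
          cases extra with
          | nil => rfl
          | cons x extra' => exfalso; simp only [List.length_cons] at hd; push_cast at hd; omega
        subst hex
        exact (pvLoopB_no_write target rest (idx+1) _ (s : Int) st (m.insert (s : Int) (idx : Int))
            hst (by push_cast; omega)).trans (by rw [PySem.Dict.get?_insert_self])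
      · -- 'end' with the counter still positive: extra nonempty, its head is popped
        rw [beq_iff_eq] at h3
        cases extra with
        | nil => exfalso; simp only [List.length_nil] at hd; push_cast at hd; omega
        | cons x extra' =>
          have hxs : (s : Int) ≠ x := by have := hextra x List.mem_cons_self; omega
          refine (ih (idx+1) _ extra' st (m.insert x (idx : Int)) s (d - 1) hst (by omega)
              (fun y hy => hextra y (List.mem_cons_of_mem _ hy))
              (by simp only [List.length_cons] at hd; push_cast at hd ⊢; omega)).trans ?_
          cases he : pvFindEnd (rest.map pvNorm) (idx + 1) (d - 1) with
          | some e => rfl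
          | none => exact PySem.Dict.get?_insert_of_ne _ _ hxs
      · -- other line: nothing changes
        exact ih (idx+1) _ extra st m s d hst (by omega) hextra hd

-- pre-start phase: once the target line at offset k is found, its dict entry is pvFindEnd
theorem pvLoopB_dict (target : String) (lines : List String)
    (hsw : PySem.Str.startswith target "config " = true) :
    ∀ (idx : Nat) (st : List Int) (m : PySem.Dict Int Int) (k : Nat),
    (∀ x ∈ st, x < (idx : Int)) → (∀ j : Nat, idx ≤ j → m.get? (j : Int) = none) →
    PySem.List.index? (lines.map pvNorm) target = some k →
    ((pvLoopB target lines idx (-1) st m).2).get? ((idx + k : Nat) : Int) =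
      match pvFindEnd ((lines.map pvNorm).drop (k+1)) (idx + k + 1) 1 with
      | some e => some ((e : Nat) : Int)
      | none => none := by
  induction lines with
  | nil => intro idx st m k hst hm hfound; simp [PySem.List.index?] at hfound
  | cons raw rest ih =>
    intro idx st m k hst hm hfound
    rw [List.map_cons] at hfound
    by_cases h : pvNorm raw == target
    · have ht : pvNorm raw = target := eq_of_beq h
      rw [ht, PySem.List.index?_cons_self] at hfound
      have hk0 : k = 0 := (Option.some.inj hfound).symm
      subst hk0
      simp only [Nat.add_zero, List.map_cons, List.drop_succ_cons, List.drop_zero]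
      have hc : ((-1 : Int) < 0 ∧ (pvNorm raw == target) = true) := ⟨by norm_num, h⟩
      have hsw' : PySem.Str.startswith (pvNorm raw) "config " = true := by rw [ht]; exact hsw
      simp only [pvLoopB, if_pos hc, if_pos hsw']
      exact (pvLoopB_pop target rest (idx + 1) ((idx : Nat) : Int) [] st m idx 1
          (fun hmem => absurd (hst _ hmem) (by simp)) (by omega) (by simp) (by simp)).trans
        (by cases he : pvFindEnd (rest.map pvNorm) (idx + 1) 1 with
            | none => exact hm idx (Nat.le_refl _)
            | some e => rfl)
    · have ht : pvNorm raw ≠ target := fun he => h (by simp [he])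
      rw [PySem.List.index?_cons_of_ne _ ht] at hfound
      rcases Option.map_eq_some_iff.mp hfound with ⟨k', hk', hkk⟩
      subst hkk
      have hc : ¬ ((-1 : Int) < 0 ∧ (pvNorm raw == target) = true) := by rintro ⟨_, hh⟩; exact h hh
      simp only [pvLoopB, if_neg hc]
      have harith : ((idx + (k' + 1) : Nat) : Int) = ((idx + 1 + k' : Nat) : Int) := by push_cast; ring
      have hdrop : ((raw :: rest).map pvNorm).drop (k' + 1 + 1) = (rest.map pvNorm).drop (k' + 1) := by
        rw [List.map_cons, List.drop_succ_cons]
      have hidx : idx + (k' + 1) + 1 = (idx + 1) + k' + 1 := by omega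
      rw [harith, hdrop, hidx]
      split_ifs with h1 h2
      · exact ih (idx + 1) _ m k'
          (fun x hx => by rcases List.mem_cons.mp hx with hh | hh
                          · exact hh ▸ (by push_cast; omega)
                          · have := hst x hh; push_cast; omega)
          (fun j hj => hm j (by omega)) hk'
      · cases st with
        | nil => exact ih (idx + 1) _ m k' (by simp) (fun j hj => hm j (by omega)) hk'
        | cons top st' =>
          refine ih (idx + 1) _ _ k'
            (fun x hx => by have := hst x (List.mem_cons_of_mem _ hx); push_cast; omega)
            (fun j hj => ?_) hk'
          rw [PySem.Dict.get?_insert_of_ne]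
          · exact hm j (by omega)
          · have := hst top (List.mem_cons_self)
            intro he
            rw [← he] at this
            omega
      · exact ih (idx + 1) _ m k'
          (fun x hx => by have := hst x hx; push_cast; omega)
          (fun j hj => hm j (by omega)) hk'

-- corollaries packaging the characterizations for the final proof
-- clean corollaries of pvLoopA_false for the three outcomes
theorem pvLoopA_none (target : String) (lines : List String)
    (hi : PySem.List.index? (lines.map pvNorm) target = none) :
    pvLoopA target lines 0 (-1) (-1) 0 false = (-1, -1) := by
  rw [pvLoopA_false target lines 0, hi]

theorem pvLoopA_some_none (target : String) (lines : List String) (s : Nat)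
    (hi : PySem.List.index? (lines.map pvNorm) target = some s)
    (he : pvFindEnd ((lines.map pvNorm).drop (s+1)) (s + 1) 1 = none) :
    pvLoopA target lines 0 (-1) (-1) 0 false = ((s : Int), -1) := by
  rw [pvLoopA_false target lines 0, hi]
  simp only [Nat.zero_add] at he ⊢
  rw [he]

theorem pvLoopA_some_some (target : String) (lines : List String) (s e : Nat)
    (hi : PySem.List.index? (lines.map pvNorm) target = some s)
    (he : pvFindEnd ((lines.map pvNorm).drop (s+1)) (s + 1) 1 = some e) :
    pvLoopA target lines 0 (-1) (-1) 0 false = ((s : Int), (e : Int)) := by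
  rw [pvLoopA_false target lines 0, hi]
  simp only [Nat.zero_add] at he ⊢
  rw [he]

-- B's full run from idx 0: the three outcomes
theorem pvLoopB_run_none (target : String) (lines : List String)
    (hi : PySem.List.index? (lines.map pvNorm) target = none) :
    (pvLoopB target lines 0 (-1) [] PySem.Dict.empty).1 = -1 := by
  rw [pvLoopB_start target lines 0 [] PySem.Dict.empty, hi]

theorem pvLoopB_run_some (target : String) (lines : List String) (s : Nat)
    (hi : PySem.List.index? (lines.map pvNorm) target = some s) :
    (pvLoopB target lines 0 (-1) [] PySem.Dict.empty).1 = ((s : Nat) : Int) := by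
  rw [pvLoopB_start target lines 0 [] PySem.Dict.empty, hi]
  simp

theorem pvLoopB_run_dict (target : String) (lines : List String) (s : Nat)
    (hsw : PySem.Str.startswith target "config " = true)
    (hi : PySem.List.index? (lines.map pvNorm) target = some s) :
    ((pvLoopB target lines 0 (-1) [] PySem.Dict.empty).2).get? ((s : Nat) : Int) =
      match pvFindEnd ((lines.map pvNorm).drop (s+1)) (s + 1) 1 with
      | some e => some ((e : Nat) : Int)
      | none => none := by
  have := pvLoopB_dict target lines hsw 0 [] PySem.Dict.empty s (by simp)
    (fun j _ => PySem.Dict.get?_empty _) hi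
  simpa using this

theorem pvLoopB_run_dict_none (target : String) (lines : List String) (s : Nat)
    (hsw : PySem.Str.startswith target "config " = true)
    (hi : PySem.List.index? (lines.map pvNorm) target = some s)
    (he : pvFindEnd ((lines.map pvNorm).drop (s+1)) (s + 1) 1 = none) :
    ((pvLoopB target lines 0 (-1) [] PySem.Dict.empty).2).get? ((s : Nat) : Int) = none := by
  rw [pvLoopB_run_dict target lines s hsw hi, he]

theorem pvLoopB_run_dict_some (target : String) (lines : List String) (s e : Nat)
    (hsw : PySem.Str.startswith target "config " = true)
    (hi : PySem.List.index? (lines.map pvNorm) target = some s)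
    (he : pvFindEnd ((lines.map pvNorm).drop (s+1)) (s + 1) 1 = some e) :
    ((pvLoopB target lines 0 (-1) [] PySem.Dict.empty).2).get? ((s : Nat) : Int) = some ((e : Nat) : Int) := by
  rw [pvLoopB_run_dict target lines s hsw hi, he]

-- ===== VERDICT (by name: the statement is the Claim_ definition above) =====
theorem replace_or_append_config_section_spec : Claim_equal_replace_or_append_config_section := by
  intro config_text section_name section_body _
  unfold Spec_replace_or_append_config_section
  unfold replace_or_append_config_section replace_or_append_config_section_alt
  simp only []
  set target := PySem.Str.lower ("config " ++ section_name) with htarget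
  set lines := PySem.Str.splitlines config_text with hlines
  set sec := PySem.Str.splitlines section_body with hsec
  have hsw : PySem.Str.startswith target "config " = true := pvTarget_startswith section_name
  cases hi : PySem.List.index? (lines.map pvNorm) target with
  | none =>
    -- no start: both append
    rw [pvLoopA_none target lines hi]
    rw [pvLoopB_run_none target lines hi]
    rw [if_neg (by rintro ⟨h1, h2⟩; simp at h1)]
    rw [if_neg (by norm_num)]
    rw [PySem.List.pyGet?_neg_one]
    cases hl : lines.getLast? with
    | none => simp
    | some l =>
      by_cases hstrip : PySem.Str.strip l == ""
      · simp [hstrip]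
      · simp [hstrip]
  | some s =>
    rw [pvLoopB_run_some target lines s hi]
    rw [if_pos (Int.natCast_nonneg s)]
    cases he : pvFindEnd ((lines.map pvNorm).drop (s+1)) (s + 1) 1 with
    | none =>
      -- start found, no end: both append
      rw [pvLoopA_some_none target lines s hi he]
      rw [pvLoopB_run_dict_none target lines s hsw hi he]
      rw [if_neg (by rintro ⟨h1, h2⟩; exact absurd (le_trans (Int.natCast_nonneg s) h2) (by norm_num))]
      rw [PySem.List.pyGet?_neg_one]
      cases hl : lines.getLast? with
      | none => simp
      | some l =>
        by_cases hstrip : PySem.Str.strip l == ""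
        · simp [hstrip]
        · simp [hstrip]
    | some e =>
      rw [pvLoopA_some_some target lines s e hi he]
      rw [pvLoopB_run_dict_some target lines s e hsw hi he]
      have hse : s + 1 ≤ e := pvFindEnd_ge _ _ _ _ he
      have hcond : ((s : Int), (e : Int)).1 ≥ 0 ∧ ((s : Int), (e : Int)).2 ≥ ((s : Int), (e : Int)).1 := by
        constructor
        · exact Int.natCast_nonneg s
        · show ((e : Int)) ≥ ((s : Int))
          exact_mod_cast Nat.le_of_succ_le hse
      rw [if_pos hcond]
      rw [PySem.List.slice_to_natCast]
      rw [show ((e : Int) + 1) = ((e + 1 : Nat) : Int) by push_cast; ring]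
      rw [PySem.List.slice_from_natCast]
      simp
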